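-- pv_equiv track=rewrite | github.com/BryanL43/MergeExtractor | src/ChunkProcessor.py | has_section_title
-- ===== SOURCE A (Python) =====
-- def has_section_title(chunk: str, phrase: str) -> bool:
--     """Check if the section contains the header as a title"""
--     paragraphs = [];
--     buffer = [];
--
--     # Split the text into paragraphs
--     for line in chunk.splitlines():
--         line = line.strip();
--
--         # Detected a empty line; flush the buffer & stash paragraph
--         if line == "":
--             if buffer:
--                 paragraphs.append(buffer);
--                 buffer = [];
--         else: # Non-empty line
--             buffer.append(line);
--
--     # Flush the last paragraph
--     if buffer:
--         paragraphs.append(buffer);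
--
--     # Find the paragraph containing the phrase.
--     # If it has a lenght of 2 or less line then it's likely a section title.
--     for para_lines in paragraphs:
--         joined = "\n".join(para_lines);
--         if phrase.lower() in joined.lower() and len(para_lines) <= 2:
--             return True;
--
--     return False;
-- ===== SOURCE B (Python) =====
-- def has_section_title(chunk: str, phrase: str) -> bool:
--     """Lookahead at each paragraph start: a 'title' paragraph is one or two
--     non-blank lines delimited by blanks/edges, so inspect at most two lines
--     ahead and skip longer paragraphs wholesale without reading them."""
--     needle = phrase.lower()
--     lines = [l.strip() for l in chunk.splitlines()]
--
--     def go(ls):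
--         # ls begins at a paragraph boundary
--         if not ls:
--             return False
--         a = ls[0]
--         rest = ls[1:]
--         if not a:
--             return go(rest)
--         if not rest or not rest[0]:
--             # one-line paragraph
--             return needle in a.lower() or go(rest)
--         b = rest[0]
--         rest2 = rest[1:]
--         if not rest2 or not rest2[0]:
--             # two-line paragraph
--             return needle in (a + "\n" + b).lower() or go(rest2)
--         # paragraph of three or more lines: skip it entirely
--         while rest2 and rest2[0]:
--             rest2 = rest2[1:]
--         return go(rest2)
--
--     return go(lines)
-- ===== Notes on version B (the rewrite author's own statement) =====
-- stated objective: alternative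
-- what changed: B never builds paragraphs or a line buffer: it strips the lines once and recurses from paragraph boundary to paragraph boundary, testing the phrase directly against a one- or two-line lookahead window and skipping paragraphs of three or more lines wholesale without joining or reading their content, whereas A accumulates every paragraph into a buffer list and length-tests the joined text.
import Mathlib
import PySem

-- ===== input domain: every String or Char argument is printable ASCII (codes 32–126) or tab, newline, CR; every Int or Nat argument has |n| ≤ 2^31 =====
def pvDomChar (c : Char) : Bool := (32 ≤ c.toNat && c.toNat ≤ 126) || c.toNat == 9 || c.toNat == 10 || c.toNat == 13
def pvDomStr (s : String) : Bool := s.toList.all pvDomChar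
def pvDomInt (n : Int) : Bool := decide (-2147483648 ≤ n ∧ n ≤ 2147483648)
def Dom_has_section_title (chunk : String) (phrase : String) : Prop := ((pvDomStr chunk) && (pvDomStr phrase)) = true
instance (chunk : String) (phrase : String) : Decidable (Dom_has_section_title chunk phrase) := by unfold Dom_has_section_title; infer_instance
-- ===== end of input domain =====

-- B replaces A's buffer/paragraph accumulation by a recursion from paragraph boundary to
-- paragraph boundary with a one-/two-line lookahead, skipping longer paragraphs wholesale
-- (objective: alternative).

-- ===== PORT A =====
-- A's per-paragraph check (the condition of A's second loop)
def pvCheckA (phrase : String) (para : List String) : Bool :=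
  PySem.Str.isIn (PySem.Str.lower phrase) (PySem.Str.lower (PySem.Str.join "\n" para))
    && decide (para.length ≤ 2)

-- the body of A's paragraph-splitting loop
def pvStepA (st : List (List String) × List String) (rawLine : String) :
    List (List String) × List String :=
  let line := PySem.Str.strip rawLine
  if line == "" then
    if st.2.isEmpty then st else (st.1 ++ [st.2], [])
  else (st.1, st.2 ++ [line])

-- the final flush and the scan of the paragraphs list
def pvFinish (phrase : String) (st : List (List String) × List String) : Bool :=
  (if st.2.isEmpty then st.1 else st.1 ++ [st.2]).any (pvCheckA phrase)

def has_section_title (chunk : String) (phrase : String) : Bool :=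
  pvFinish phrase ((PySem.Str.splitlines chunk).foldl pvStepA ([], []))

-- ===== PORT B =====
-- the `while rest2 and rest2[0]` loop of Source B: drop the leading non-blank lines
def pvSkip : List String → List String
  | [] => []
  | l :: rest => if l == "" then l :: rest else pvSkip rest

theorem pvSkip_length_le (ls : List String) : (pvSkip ls).length ≤ ls.length := by
  induction ls with
  | nil => simp [pvSkip]
  | cons l rest ih =>
    simp only [pvSkip]
    split
    · exact le_refl _
    · exact Nat.le_succ_of_le ih

-- Source B's `go`: ls begins at a paragraph boundary
def pvGo (needle : String) : List String → Bool
  | [] => false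
  | a :: rest =>
    if a == "" then pvGo needle rest
    else
      match rest with
      | [] => PySem.Str.isIn needle (PySem.Str.lower a)
      | b :: rest2 =>
        if b == "" then
          PySem.Str.isIn needle (PySem.Str.lower a) || pvGo needle (b :: rest2)
        else
          match rest2 with
          | [] => PySem.Str.isIn needle (PySem.Str.lower (a ++ "\n" ++ b))
          | c :: ls3 =>
            if c == "" then
              PySem.Str.isIn needle (PySem.Str.lower (a ++ "\n" ++ b)) || pvGo needle (c :: ls3)
            else
              pvGo needle (pvSkip (c :: ls3))
  termination_by ls => ls.length
  decreasing_by
    · simp only [List.length_cons]; omega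
    · simp only [List.length_cons]; omega
    · simp only [List.length_cons]; omega
    · have h := pvSkip_length_le (c :: ls3)
      simp only [List.length_cons] at h ⊢
      omega

def has_section_title_alt (chunk : String) (phrase : String) : Bool :=
  pvGo (PySem.Str.lower phrase) ((PySem.Str.splitlines chunk).map PySem.Str.strip)

-- ===== PRECONDITION & SPEC =====
def Spec_has_section_title (chunk : String) (phrase : String) (out : Bool) : Prop := out = has_section_title_alt chunk phrase
instance (chunk : String) (phrase : String) (out : Bool) : Decidable (Spec_has_section_title chunk phrase out) := by unfold Spec_has_section_title; infer_instance

-- ===== CLAIM =====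
def Claim_equal_has_section_title : Prop := ∀ (chunk : String) (phrase : String), Dom_has_section_title chunk phrase → Spec_has_section_title chunk phrase (has_section_title chunk phrase)

-- ===== LEMMAS AND PROOFS =====

-- streaming buffer semantics of A over already-stripped lines (proof-only intermediate)
def pvH (needle : String) : List String → List String → Bool
  | buf, [] => !buf.isEmpty && pvCheckA' needle buf
  | buf, l :: ls =>
    if l == "" then
      if buf.isEmpty then pvH needle [] ls
      else if pvCheckA' needle buf then true else pvH needle [] ls
    else pvH needle (buf ++ [l]) ls
where pvCheckA' (needle : String) (para : List String) : Bool :=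
  PySem.Str.isIn needle (PySem.Str.lower (PySem.Str.join "\n" para)) && decide (para.length ≤ 2)

theorem pvCheckA_eq (phrase : String) (para : List String) :
    pvCheckA phrase para = pvH.pvCheckA' (PySem.Str.lower phrase) para := rfl

theorem if_true_or (c x : Bool) : (if c = true then true else x) = (c || x) := by
  cases c <;> simp

theorem pvCheck_one (needle a : String) :
    pvH.pvCheckA' needle [a] = PySem.Str.isIn needle (PySem.Str.lower a) := by
  simp [pvH.pvCheckA', PySem.Chars.join_singleton]

theorem pvCheck_two (needle a b : String) :
    pvH.pvCheckA' needle [a, b] = PySem.Str.isIn needle (PySem.Str.lower (a ++ "\n" ++ b)) := by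
  simp [pvH.pvCheckA', PySem.Chars.join_cons_cons, PySem.Chars.join_singleton]

theorem pvCheck_big (needle : String) (buf : List String) (h : ¬ buf.length ≤ 2) :
    pvH.pvCheckA' needle buf = false := by
  unfold pvH.pvCheckA'
  rw [decide_eq_false h, Bool.and_false]

-- shape equations for pvGo (well-founded recursion, so spelled out once here)
theorem pvGo_nil (needle : String) : pvGo needle [] = false := by
  rw [pvGo.eq_def]

theorem pvGo_blank (needle a : String) (rest : List String) (ha : (a == "") = true) :
    pvGo needle (a :: rest) = pvGo needle rest := by
  rw [pvGo.eq_def]; simp [ha]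

theorem pvGo_one (needle a : String) (ha : (a == "") = false) :
    pvGo needle [a] = PySem.Str.isIn needle (PySem.Str.lower a) := by
  rw [pvGo.eq_def]; simp [ha]

theorem pvGo_two_blank (needle a b : String) (rest2 : List String)
    (ha : (a == "") = false) (hb : (b == "") = true) :
    pvGo needle (a :: b :: rest2)
      = (PySem.Str.isIn needle (PySem.Str.lower a) || pvGo needle (b :: rest2)) := by
  rw [pvGo.eq_def]; simp [ha, hb]

theorem pvGo_pair (needle a b : String) (ha : (a == "") = false) (hb : (b == "") = false) :
    pvGo needle [a, b] = PySem.Str.isIn needle (PySem.Str.lower (a ++ "\n" ++ b)) := by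
  rw [pvGo.eq_def]; simp [ha, hb]

theorem pvGo_three_blank (needle a b c : String) (ls3 : List String)
    (ha : (a == "") = false) (hb : (b == "") = false) (hc : (c == "") = true) :
    pvGo needle (a :: b :: c :: ls3)
      = (PySem.Str.isIn needle (PySem.Str.lower (a ++ "\n" ++ b)) || pvGo needle (c :: ls3)) := by
  rw [pvGo.eq_def]; simp [ha, hb, hc]

theorem pvGo_skip (needle a b c : String) (ls3 : List String)
    (ha : (a == "") = false) (hb : (b == "") = false) (hc : (c == "") = false) :
    pvGo needle (a :: b :: c :: ls3) = pvGo needle (pvSkip (c :: ls3)) := by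
  rw [pvGo.eq_def]; simp [ha, hb, hc]

-- A's fold equals the streaming buffer semantics over the stripped lines
theorem pvMain (phrase : String) :
    ∀ (lines : List String) (paras : List (List String)) (buf : List String),
      pvFinish phrase (lines.foldl pvStepA (paras, buf))
      = (paras.any (pvCheckA phrase)
          || pvH (PySem.Str.lower phrase) buf (lines.map PySem.Str.strip)) := by
  intro lines
  induction lines with
  | nil =>
    intro paras buf
    cases buf with
    | nil => simp [pvFinish, pvH]
    | cons b bs => simp [pvFinish, pvH, pvCheckA_eq]
  | cons rawLine rest ih =>
    intro paras buf
    rw [List.foldl_cons]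
    by_cases h : PySem.Str.strip rawLine == ""
    · cases hb : buf.isEmpty
      · rw [show pvStepA (paras, buf) rawLine = (paras ++ [buf], []) by
              simp [pvStepA, h, hb], ih]
        simp only [List.map_cons, pvH, h, if_true, hb, Bool.false_eq_true, if_false,
          List.any_append, List.any_cons, List.any_nil, Bool.or_false, pvCheckA_eq]
        cases hc : pvH.pvCheckA' (PySem.Str.lower phrase) buf <;> simp [hc, Bool.or_assoc]
      · rw [show pvStepA (paras, buf) rawLine = (paras, buf) by
              simp [pvStepA, h, hb], ih]
        have : buf = [] := by simpa [List.isEmpty_iff] using hb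
        subst this
        simp [pvH, h]
    · rw [show pvStepA (paras, buf) rawLine = (paras, buf ++ [PySem.Str.strip rawLine]) by
            simp [pvStepA, h], ih]
      simp [pvH, h]

-- combined induction: streaming buffer semantics = B's lookahead recursion
theorem pvHGo (needle : String) :
    ∀ (n : ℕ) (ls : List String), ls.length = n →
      (pvH needle [] ls = pvGo needle ls)
      ∧ (∀ buf : List String, 3 ≤ buf.length →
          pvH needle buf ls = pvGo needle (pvSkip ls)) := by
  intro n
  induction n using Nat.strong_induction_on with
  | _ n ih =>
    intro ls hn
    constructor
    · -- paragraph-boundary part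
      rcases ls with _ | ⟨a, rest⟩
      · simp [pvH, pvGo_nil]
      · simp only [List.length_cons] at hn
        cases ha : (a == "")
        · rcases rest with _ | ⟨b, rest2⟩
          · -- one-line chunk [a]
            simp [pvH, ha, pvGo_one needle a ha, pvCheck_one]
          · simp only [List.length_cons] at hn
            cases hb : (b == "")
            · rcases rest2 with _ | ⟨c, ls3⟩
              · -- two-line chunk [a, b]
                simp [pvH, ha, hb, pvGo_pair needle a b ha hb, pvCheck_two]
              · simp only [List.length_cons] at hn
                cases hc : (c == "")
                · -- paragraph of length ≥ 3: both sides skip it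
                  have haux := (ih ls3.length (by omega) ls3 rfl).2 [a, b, c] (by simp)
                  calc pvH needle [] (a :: b :: c :: ls3)
                      = pvH needle [a, b, c] ls3 := by simp [pvH, ha, hb, hc]
                    _ = pvGo needle (pvSkip ls3) := haux
                    _ = pvGo needle (pvSkip (c :: ls3)) := by simp [pvSkip, hc]
                    _ = pvGo needle (a :: b :: c :: ls3) :=
                        (pvGo_skip needle a b c ls3 ha hb hc).symm
                · -- two-line paragraph closed by the blank c
                  have hm := (ih ls3.length (by omega) ls3 rfl).1
                  have h1 : pvH needle [] (a :: b :: c :: ls3)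
                      = (if pvH.pvCheckA' needle [a, b] = true then true
                         else pvH needle [] ls3) := by simp [pvH, ha, hb, hc]
                  rw [h1, if_true_or, pvCheck_two, hm,
                    pvGo_three_blank needle a b c ls3 ha hb hc, pvGo_blank needle c ls3 hc]
            · -- one-line paragraph closed by the blank b
              have hm := (ih rest2.length (by omega) rest2 rfl).1
              have h1 : pvH needle [] (a :: b :: rest2)
                  = (if pvH.pvCheckA' needle [a] = true then true
                     else pvH needle [] rest2) := by simp [pvH, ha, hb]
              rw [h1, if_true_or, pvCheck_one, hm,
                pvGo_two_blank needle a b rest2 ha hb, pvGo_blank needle b rest2 hb]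
        · -- leading blank line
          have hm := (ih rest.length (by omega) rest rfl).1
          simp [pvH, ha, hm, pvGo_blank needle a rest ha]
    · -- buffer already longer than 2: everything up to the next blank is irrelevant
      intro buf hbuf
      have hne : buf.isEmpty = false := by
        cases buf with
        | nil => simp at hbuf
        | cons x xs => simp
      rcases ls with _ | ⟨l, rest⟩
      · simp [pvH, hne, pvCheck_big needle buf (by omega), pvSkip, pvGo_nil]
      · simp only [List.length_cons] at hn
        cases hl : (l == "")
        · -- non-blank: A grows the buffer, B is already skipping
          have haux := (ih rest.length (by omega) rest rfl).2 (buf ++ [l])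
            (by simp; omega)
          calc pvH needle buf (l :: rest) = pvH needle (buf ++ [l]) rest := by
                simp [pvH, hl]
            _ = pvGo needle (pvSkip rest) := haux
            _ = pvGo needle (pvSkip (l :: rest)) := by simp [pvSkip, hl]
        · -- blank: the long paragraph ends, its check fails
          have hm := (ih rest.length (by omega) rest rfl).1
          have h1 : pvH needle buf (l :: rest) = pvH needle [] rest := by
            simp [pvH, hl, hne, pvCheck_big needle buf (by omega)]
          rw [h1, hm, show pvSkip (l :: rest) = l :: rest by simp [pvSkip, hl],
            pvGo_blank needle l rest hl]

-- ===== VERDICT =====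
theorem has_section_title_spec : Claim_equal_has_section_title := by
  intro chunk phrase _
  unfold Spec_has_section_title has_section_title has_section_title_alt
  rw [pvMain]
  simp [(pvHGo (PySem.Str.lower phrase)
    ((PySem.Str.splitlines chunk).map PySem.Str.strip).length
    ((PySem.Str.splitlines chunk).map PySem.Str.strip) rfl).1]
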